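-- pv_equiv track=rewrite | github.com/bhagirath77/Plagiarism-checker | apna.py | winnowing
-- ===== SOURCE A (Python) =====
-- def winnowing(lst, d):
--     y = len(lst)
--     x = 100009
--     winList = []
--     for i in range(y - d + 1):
--         if x != min(lst[i:i + d]):
--             winList.append([min(lst[i:i + d]), i])
--             x = min(lst[i:i + d])
--     return winList
-- ===== SOURCE B (Python) =====
-- def winnowing(lst, d):
--     # Monotonic-queue sliding-window minimum (O(n)), then the same
--     # change-filter with initial sentinel 100009 as the winnowing spec.
--     n = len(lst)
--     if d < 1 or d > n:
--         return []
--     out = []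
--     prev = 100009
--     dq = []      # (value, index) pairs; active part starts at `head`; values strictly increasing
--     head = 0
--     for j, v in enumerate(lst):
--         while len(dq) > head and dq[-1][0] >= v:
--             dq.pop()
--         dq.append((v, j))
--         i = j - d + 1
--         if i >= 0:
--             if dq[head][1] < i:
--                 head += 1
--             m = dq[head][0]
--             if m != prev:
--                 out.append([m, i])
--                 prev = m
--     return out
-- ===== Notes on version B (the rewrite author's own statement) =====
-- stated objective: faster
-- what changed: Replaced the per-window min(lst[i:i+d]) rescans with a single-pass monotonic-queue sliding-window minimum, keeping the same change/sentinel filter.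
-- outside the precondition, e.g. on winnowing([5], 0): A raises ValueError, B returns []
import Mathlib
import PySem

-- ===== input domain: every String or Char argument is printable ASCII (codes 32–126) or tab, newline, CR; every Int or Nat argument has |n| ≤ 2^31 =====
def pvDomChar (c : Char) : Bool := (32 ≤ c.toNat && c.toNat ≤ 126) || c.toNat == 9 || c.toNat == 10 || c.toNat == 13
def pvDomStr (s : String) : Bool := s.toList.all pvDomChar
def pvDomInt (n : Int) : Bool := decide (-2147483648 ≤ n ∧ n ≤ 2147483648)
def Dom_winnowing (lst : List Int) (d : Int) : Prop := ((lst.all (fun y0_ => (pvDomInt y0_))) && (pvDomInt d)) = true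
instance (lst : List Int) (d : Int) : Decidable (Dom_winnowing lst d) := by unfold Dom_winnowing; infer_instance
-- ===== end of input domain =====

-- B replaces A's per-window min rescans with a one-pass monotonic-queue sliding-window minimum (same change/sentinel filter); measured asymptotically faster.


-- ===== PORT A =====
def aStep (lst : List Int) (d : Int) (st : Int × List (List Int)) (i : Int) : Int × List (List Int) :=
  match PySem.List.min? (PySem.List.slice lst (some i) (some (i + d))) (fun z => z) with
  | none => st  -- Python raises ValueError (min of empty slice) here; excluded by Pre_
  | some m => if st.1 ≠ m then (m, st.2 ++ [[m, i]]) else st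

def winnowing (lst : List Int) (d : Int) : List (List Int) :=
  let y : Int := lst.length
  ((PySem.List.pyRange 0 (y - d + 1) 1).foldl (aStep lst d) (100009, [])).2

-- ===== PORT B =====
-- `while len(dq) > head and dq[-1][0] >= v: dq.pop()`
def wBack (dq : List (Int × Int)) (v : Int) : Bool :=
  match dq.getLast? with
  | some p => decide (v ≤ p.1)
  | none => false

def wPop (head : Int) (v : Int) (dq : List (Int × Int)) : List (Int × Int) :=
  if h : head < (dq.length : Int) ∧ wBack dq v = true then
    wPop head v dq.dropLast
  else dq
termination_by dq.length
decreasing_by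
  cases dq with
  | nil => simp [wBack] at h
  | cons a t => simp [List.length_dropLast]

-- one iteration of Source B's `for j, v in enumerate(lst)` body; state (dq, head, prev, out)
def wStep (d : Int) (st : List (Int × Int) × Int × Int × List (List Int)) (jv : Int × Int) :
    List (Int × Int) × Int × Int × List (List Int) :=
  let dq := wPop st.2.1 jv.2 st.1 ++ [(jv.2, jv.1)]
  let i := jv.1 - d + 1
  if 0 ≤ i then
    let head' := match PySem.List.pyGet? dq st.2.1 with
      | some p => if p.2 < i then st.2.1 + 1 else st.2.1
      | none => st.2.1   -- unreachable under Pre_: Python would raise; guard only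
    let m := match PySem.List.pyGet? dq head' with
      | some p => p.1
      | none => 0        -- unreachable under Pre_: Python would raise; guard only
    if m ≠ st.2.2.1 then (dq, head', m, st.2.2.2 ++ [[m, i]])
    else (dq, head', st.2.2.1, st.2.2.2)
  else (dq, st.2.1, st.2.2.1, st.2.2.2)

def winnowing_alt (lst : List Int) (d : Int) : List (List Int) :=
  let n : Int := lst.length
  if d < 1 ∨ n < d then []
  else ((PySem.List.enumerate lst 0).foldl (wStep d) ([], 0, 100009, [])).2.2.2

-- ===== PRECONDITION & SPEC =====
-- Pre_ excludes exactly d ≤ 0, where Python A raises ValueError (min of the empty slice lst[i:i]).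
def Pre_winnowing (lst : List Int) (d : Int) : Prop := 1 ≤ d
instance (lst : List Int) (d : Int) : Decidable (Pre_winnowing lst d) := by unfold Pre_winnowing; infer_instance
def pvWitness_winnowing : List Int × Int := ([3, 1, 2, 4], 2)

def Spec_winnowing (lst : List Int) (d : Int) (out : List (List Int)) : Prop := out = winnowing_alt lst d
instance (lst : List Int) (d : Int) (out : List (List Int)) : Decidable (Spec_winnowing lst d out) := by unfold Spec_winnowing; infer_instance

-- ===== CLAIM (what is proved, stated in full; the proofs are below) =====
def Claim_equal_winnowing : Prop := ∀ (lst : List Int) (d : Int), Dom_winnowing lst d → Pre_winnowing lst d → Spec_winnowing lst d (winnowing lst d)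

-- ===== LEMMAS AND PROOFS =====

-- abbreviations used only by the proofs
def wCond (lst : List Int) (hi k : Nat) : Bool :=
  (List.range' (k+1) (hi-k)).all (fun m => decide (lst.getD k 0 < lst.getD m 0))

-- the "candidate" indices of the window [lo, hi]: k kept iff strictly below everything after it
def wCand (lst : List Int) (lo hi : Nat) : List Nat :=
  (List.range' lo (hi+1-lo)).filter (wCond lst hi)

-- A's fold state after t windows
def aState (lst : List Int) (d : Int) (t : Nat) : Int × List (List Int) :=
  (PySem.List.pyRange 0 (t : Int) 1).foldl (aStep lst d) (100009, [])

-- B's invariant after processing indices 0..j (d' = d.toNat)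
def bInv (lst : List Int) (d' j : Nat) (st : List (Int × Int) × Int × Int × List (List Int)) : Prop :=
  ∃ headN : Nat, st.2.1 = (headN : Int) ∧
    st.1.drop headN = (wCand lst (j+1-d') j).map (fun k => (lst.getD k 0, (k : Int))) ∧
    (st.2.2.1, st.2.2.2) = aState lst (d' : Int) (j+2-d')

theorem pairwise_lt_range'_one (s n : Nat) : (List.range' s n).Pairwise (· < ·) := by
  induction n generalizing s with
  | zero => simp
  | succ k ih =>
    rw [List.range'_succ]
    exact List.Pairwise.cons (by intro b hb; have := List.mem_range'_1.mp hb; omega) (ih (s+1))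

theorem wCond_iff (lst : List Int) (hi k : Nat) :
    wCond lst hi k = true ↔ ∀ m, k < m → m ≤ hi → lst.getD k 0 < lst.getD m 0 := by
  unfold wCond
  simp only [List.all_eq_true, List.mem_range'_1, decide_eq_true_eq]
  constructor
  · intro h m h1 h2; exact h m ⟨by omega, by omega⟩
  · intro h m hm; exact h m (by omega) (by omega)

theorem mem_wCand (lst : List Int) (lo hi k : Nat) (hlo : lo ≤ hi) :
    k ∈ wCand lst lo hi ↔ (lo ≤ k ∧ k ≤ hi ∧ wCond lst hi k = true) := by
  unfold wCand
  simp only [List.mem_filter, List.mem_range'_1]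
  constructor
  · rintro ⟨⟨h1, h2⟩, h3⟩; exact ⟨h1, by omega, h3⟩
  · rintro ⟨h1, h2, h3⟩; exact ⟨⟨h1, by omega⟩, h3⟩

theorem wCand_pairwise (lst : List Int) (lo hi : Nat) : (wCand lst lo hi).Pairwise (· < ·) :=
  (pairwise_lt_range'_one lo (hi+1-lo)).filter _

theorem wCand_self (lst : List Int) (lo hi : Nat) (hlo : lo ≤ hi) : hi ∈ wCand lst lo hi := by
  rw [mem_wCand lst lo hi hi hlo]
  refine ⟨hlo, le_refl _, ?_⟩
  unfold wCond; simp

theorem wCand_ne_nil (lst : List Int) (lo hi : Nat) (hlo : lo ≤ hi) : wCand lst lo hi ≠ [] :=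
  List.ne_nil_of_mem (wCand_self lst lo hi hlo)

theorem wCand_single (lst : List Int) (lo : Nat) : wCand lst lo lo = [lo] := by
  unfold wCand
  have h1 : lo + 1 - lo = 1 := by omega
  rw [h1]
  have hc : wCond lst lo lo = true := by unfold wCond; simp
  simp [List.range', hc]

-- values are strictly increasing along wCand
theorem wCand_values_pairwise (lst : List Int) (lo hi : Nat) (hlo : lo ≤ hi) :
    (wCand lst lo hi).Pairwise (fun k k' => lst.getD k 0 < lst.getD k' 0) := by
  refine (wCand_pairwise lst lo hi).imp_of_mem ?_
  intro a b ha hb hab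
  rw [mem_wCand lst lo hi a hlo] at ha
  rw [mem_wCand lst lo hi b hlo] at hb
  exact (wCond_iff lst hi a).mp ha.2.2 b hab hb.2.1

-- push: appending element hi+1 filters the old candidates by value and appends hi+1
theorem wCand_push (lst : List Int) (lo hi : Nat) (hlo : lo ≤ hi) :
    wCand lst lo (hi+1) =
      (wCand lst lo hi).filter (fun k => decide (lst.getD k 0 < lst.getD (hi+1) 0)) ++ [hi+1] := by
  unfold wCand
  have h1 : List.range' lo (hi+1+1-lo) = List.range' lo (hi+1-lo) ++ [hi+1] := by
    have h2 : hi + 1 + 1 - lo = (hi + 1 - lo) + 1 := by omega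
    rw [h2]
    have := List.range'_concat (s := lo) (n := hi + 1 - lo) (step := 1)
    simpa [show lo + (hi + 1 - lo) = hi + 1 by omega] using this
  rw [h1, List.filter_append, List.filter_filter]
  congr 1
  · apply List.filter_congr
    intro k hk
    have hkb := List.mem_range'_1.mp hk
    -- wCond at hi+1 splits into wCond at hi and a comparison with position hi+1
    unfold wCond
    have h3 : List.range' (k+1) (hi+1-k) = List.range' (k+1) (hi-k) ++ [hi+1] := by
      have h4 : hi + 1 - k = (hi - k) + 1 := by omega
      rw [h4]
      have := List.range'_concat (s := k + 1) (n := hi - k) (step := 1)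
      simpa [show k + 1 + (hi - k) = hi + 1 by omega] using this
    rw [h3, List.all_append]
    simp [Bool.and_comm]
  · have hc : wCond lst (hi+1) (hi+1) = true := by unfold wCond; simp
    simp [hc]

-- front: splitting off the lowest index
theorem wCand_front (lst : List Int) (lo hi : Nat) (hlo : lo ≤ hi) :
    wCand lst lo hi =
      (if wCond lst hi lo = true then [lo] else []) ++ wCand lst (lo+1) hi := by
  unfold wCand
  have h1 : hi + 1 - lo = (hi - lo) + 1 := by omega
  have h2 : hi - lo = hi + 1 - (lo + 1) := by omega
  rw [h1, List.range'_succ, List.filter_cons, h2]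
  split <;> simp

-- the head of wCand is the position of the window minimum
theorem wCand_head_min (lst : List Int) (t lo hi k0 : Nat) (hfuel : hi - lo ≤ t) (hlo : lo ≤ hi)
    (hk : (wCand lst lo hi).head? = some k0) :
    ∀ m, lo ≤ m → m ≤ hi → lst.getD k0 0 ≤ lst.getD m 0 := by
  induction t generalizing lo with
  | zero =>
    have hle : lo = hi := by omega
    subst hle
    rw [wCand_single lst lo] at hk
    simp only [List.head?_cons, Option.some_inj] at hk
    intro m h1 h2
    have hm : m = lo := by omega
    subst hm
    rw [← hk]
  | succ t ih =>
    by_cases hc : wCond lst hi lo = true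
    · have hfront := wCand_front lst lo hi hlo
      rw [hfront] at hk
      simp only [hc, if_true, List.cons_append, List.head?_cons, Option.some_inj] at hk
      subst hk
      intro m h1 h2
      rcases Nat.eq_or_lt_of_le h1 with h | h
      · subst h; exact le_refl _
      · exact le_of_lt ((wCond_iff lst hi lo).mp hc m h h2)
    · -- lo is not a candidate: some later position is ≤ it
      have hwit : ∃ m', lo < m' ∧ m' ≤ hi ∧ lst.getD m' 0 ≤ lst.getD lo 0 := by
        unfold wCond at hc
        rw [List.all_eq_true] at hc
        push_neg at hc
        obtain ⟨m', hm', hp⟩ := hc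
        have := List.mem_range'_1.mp hm'
        exact ⟨m', by omega, by omega, by simpa using hp⟩
      obtain ⟨m', hm'1, hm'2, hm'3⟩ := hwit
      have hlo1 : lo + 1 ≤ hi := by omega
      have hfront := wCand_front lst lo hi hlo
      rw [hfront] at hk
      simp only [hc, if_false, List.nil_append] at hk
      have hrec := ih (lo+1) (by omega) hlo1 hk
      intro m h1 h2
      rcases Nat.eq_or_lt_of_le h1 with h | h
      · subst h
        exact le_trans (hrec m' hm'1 hm'2) hm'3
      · exact hrec m h h2

theorem min?_window (lst : List Int) (lo hi k0 : Nat) (hlo : lo ≤ hi) (hhi : hi < lst.length)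
    (hk : (wCand lst lo hi).head? = some k0) :
    PySem.List.min? ((lst.drop lo).take (hi+1-lo)) (fun z => z) = some (lst.getD k0 0) := by
  have hk0mem := List.mem_of_mem_head? hk
  rw [mem_wCand lst lo hi k0 hlo] at hk0mem
  obtain ⟨hk1, hk2, _⟩ := hk0mem
  have hwlen : ((lst.drop lo).take (hi+1-lo)).length = min (hi+1-lo) (lst.length - lo) := by
    simp [List.length_take, List.length_drop]
  have hmemw : lst.getD k0 0 ∈ (lst.drop lo).take (hi+1-lo) := by
    have hk0lt : lo + (k0 - lo) < lst.length := by omega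
    have hwin : ((lst.drop lo).take (hi+1-lo))[k0-lo]? = some lst[lo + (k0-lo)] := by
      rw [List.getElem?_take_of_lt (by omega), List.getElem?_drop, List.getElem?_eq_getElem hk0lt]
    have hval : lst.getD k0 0 = lst[lo + (k0-lo)] := by
      rw [List.getD_eq_getElem lst 0 (by omega)]
      congr 1
      omega
    rw [hval]
    exact List.mem_of_getElem? hwin
  have hub : ∀ y ∈ (lst.drop lo).take (hi+1-lo), lst.getD k0 0 ≤ y := by
    intro y hy
    obtain ⟨i, hilt, he⟩ := List.mem_iff_getElem.mp hy
    have hip : lo + i < lst.length := by omega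
    have hie : hi + 1 - lo > i := by omega
    have hyv : y = lst.getD (lo + i) 0 := by
      rw [List.getD_eq_getElem lst 0 hip, ← he]
      rw [List.getElem_take, List.getElem_drop]
    rw [hyv]
    exact wCand_head_min lst hi lo hi k0 (by omega) hlo hk (lo + i) (by omega) (by omega)
  have hne : (lst.drop lo).take (hi+1-lo) ≠ [] := by
    intro hnil
    rw [← List.length_eq_zero_iff] at hnil
    omega
  cases hmq : PySem.List.min? ((lst.drop lo).take (hi+1-lo)) (fun z => z) with
  | none => exact absurd ((PySem.List.min?_eq_none_iff _ _).mp hmq) hne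
  | some m' =>
    have h1 := PySem.List.min?_mem hmq
    have h2 := PySem.List.min?_isMin hmq (lst.getD k0 0) hmemw
    have h3 := hub m' h1
    exact congrArg some (le_antisymm h2 h3)

theorem takeWhile_eq_filter_of_incr (v : Int) (l : List (Int × Int))
    (h : l.Pairwise (fun p q => p.1 < q.1)) :
    l.takeWhile (fun p => decide (p.1 < v)) = l.filter (fun p => decide (p.1 < v)) := by
  induction l with
  | nil => rfl
  | cons p t ih =>
    rw [List.pairwise_cons] at h
    by_cases hp : p.1 < v
    · simp [List.takeWhile_cons, List.filter_cons, hp, ih h.2]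
    · have : t.filter (fun p => decide (p.1 < v)) = [] := by
        rw [List.filter_eq_nil_iff]
        intro q hq
        have := h.1 q hq
        simp only [decide_eq_true_eq]
        omega
      simp [List.takeWhile_cons, List.filter_cons, hp, this]

theorem wPop_spec (junk act : List (Int × Int)) (v : Int)
    (h : act.Pairwise (fun p q => p.1 < q.1)) :
    wPop (junk.length : Int) v (junk ++ act) =
      junk ++ act.takeWhile (fun p => decide (p.1 < v)) := by
  induction act using List.reverseRecOn with
  | nil =>
    rw [wPop]
    simp
  | append_singleton as p ih =>
    have hpw : as.Pairwise (fun p q : Int × Int => p.1 < q.1) :=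
      h.sublist (List.sublist_append_left as [p])
    have hassoc : junk ++ (as ++ [p]) = (junk ++ as) ++ [p] := by simp
    by_cases hv : v ≤ p.1
    · rw [wPop]
      have hcond : (junk.length : Int) < ((junk ++ (as ++ [p])).length : Int) ∧ wBack (junk ++ (as ++ [p])) v = true := by
        constructor
        · simp
        · unfold wBack
          rw [hassoc, List.getLast?_concat]
          simpa using hv
      rw [dif_pos hcond, hassoc, List.dropLast_concat, ih hpw]
      have hnp : (decide (p.1 < v)) = false := by simp; omega
      rw [List.takeWhile_append]
      split
      · next hlen =>
          have hpre : as.takeWhile (fun q => decide (q.1 < v)) = as :=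
            (List.takeWhile_prefix _).eq_of_length hlen
          simp [List.takeWhile_cons, hnp, hpre]
      · rfl
    · rw [wPop]
      have hcond : ¬ ((junk.length : Int) < ((junk ++ (as ++ [p])).length : Int) ∧ wBack (junk ++ (as ++ [p])) v = true) := by
        intro hcon
        have := hcon.2
        unfold wBack at this
        rw [hassoc, List.getLast?_concat] at this
        simp at this
        omega
      rw [dif_neg hcond]
      have hall : (as ++ [p]).takeWhile (fun q => decide (q.1 < v)) = as ++ [p] := by
        rw [List.takeWhile_eq_self_iff]
        intro q hq
        simp only [decide_eq_true_eq]
        rcases List.mem_append.mp hq with h1 | h1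
        · have hqp := (List.pairwise_append.mp h).2.2 q h1 p (by simp)
          omega
        · simp only [List.mem_singleton] at h1
          subst h1
          omega
      rw [hall]


theorem enumerate_append_singleton (xs : List Int) (y : Int) (s : Int) :
    PySem.List.enumerate (xs ++ [y]) s = PySem.List.enumerate xs s ++ [(s + xs.length, y)] := by
  induction xs generalizing s with
  | nil => simp [PySem.List.enumerate_nil, PySem.List.enumerate_cons]
  | cons x t ih =>
    rw [List.cons_append, PySem.List.enumerate_cons, PySem.List.enumerate_cons, ih (s+1)]
    have h : s + 1 + (t.length : Int) = s + ((x :: t).length : Int) := by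
      simp only [List.length_cons]; push_cast; omega
    rw [h, List.cons_append]

theorem take_succ_getD (xs : List Int) (j : Nat) (hj : j < xs.length) :
    xs.take (j+1) = xs.take j ++ [xs.getD j 0] := by
  rw [List.take_succ]
  congr 1
  rw [List.getElem?_eq_getElem hj]
  simp [List.getD, List.getElem?_eq_getElem hj]

-- one step of B preserves the invariant
theorem bInv_step (lst : List Int) (d' j : Nat) (st : List (Int × Int) × Int × Int × List (List Int))
    (hd : 1 ≤ d') (hj : j + 1 < lst.length) (hinv : bInv lst d' j st) :
    bInv lst d' (j+1) (wStep (d' : Int) st ((((j:Nat)+1 : Nat) : Int), lst.getD (j+1) 0)) := by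
  obtain ⟨headN, hhead, hdrop, hout⟩ := hinv
  have hlo : j + 1 - d' ≤ j := by omega
  have hne : wCand lst (j+1-d') j ≠ [] := wCand_ne_nil _ _ _ hlo
  have hlt : headN < st.1.length := by
    by_contra hcon
    push_neg at hcon
    rw [List.drop_eq_nil_of_le hcon] at hdrop
    exact hne (List.map_eq_nil_iff.mp hdrop.symm)
  have hjunk : (st.1.take headN).length = headN := by
    rw [List.length_take]
    omega
  have hsplit : st.1 = st.1.take headN ++ st.1.drop headN := (List.take_append_drop _ _).symm
  have hpw : (st.1.drop headN).Pairwise (fun p q : Int × Int => p.1 < q.1) := by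
    rw [hdrop]
    exact List.pairwise_map.mpr (wCand_values_pairwise lst (j+1-d') j hlo)
  have hpop : wPop st.2.1 (lst.getD (j+1) 0) st.1 =
      st.1.take headN ++ (st.1.drop headN).takeWhile (fun p => decide (p.1 < lst.getD (j+1) 0)) := by
    conv_lhs => rw [hhead, hsplit]
    rw [show ((headN : Nat) : Int) = ((st.1.take headN).length : Int) by rw [hjunk]]
    exact wPop_spec _ _ _ hpw
  have hdq : wPop st.2.1 (lst.getD (j+1) 0) st.1 ++ [(lst.getD (j+1) 0, ((j+1 : Nat) : Int))] =
      st.1.take headN ++ (wCand lst (j+1-d') (j+1)).map (fun k => (lst.getD k 0, (k : Int))) := by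
    rw [hpop, takeWhile_eq_filter_of_incr _ _ hpw, hdrop, List.filter_map,
        wCand_push lst (j+1-d') j hlo]
    simp
    rfl
  have hlo1 : j + 1 - d' ≤ j + 1 := by omega
  have hne1 : wCand lst (j+1-d') (j+1) ≠ [] := wCand_ne_nil _ _ _ hlo1
  simp only [wStep]
  rw [hdq]
  by_cases hc1 : d' ≤ j + 2
  · rw [if_pos (by push_cast; omega)]
    have hget0 : PySem.List.pyGet?
        (st.1.take headN ++ (wCand lst (j+1-d') (j+1)).map (fun k => (lst.getD k 0, (k : Int)))) st.2.1 =
        ((wCand lst (j+1-d') (j+1)).map (fun k => (lst.getD k 0, (k : Int)))).head? := by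
      rw [hhead, PySem.List.pyGet?_natCast, List.getElem?_append_right (by omega)]
      rw [hjunk, Nat.sub_self, ← List.head?_eq_getElem?]
    obtain ⟨k0, hk0⟩ : ∃ k0, (wCand lst (j+1-d') (j+1)).head? = some k0 := by
      cases h : (wCand lst (j+1-d') (j+1)).head? with
      | none => exact absurd (List.head?_eq_none_iff.mp h) hne1
      | some k => exact ⟨k, rfl⟩
    have hk0b := (mem_wCand lst _ _ k0 hlo1).mp (List.mem_of_mem_head? hk0)
    have hmap0 : ((wCand lst (j+1-d') (j+1)).map (fun k => (lst.getD k 0, (k : Int)))).head? =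
        some (lst.getD k0 0, (k0 : Int)) := by
      rw [List.head?_map, hk0]
      rfl
    rw [hget0, hmap0]
    simp only []
    have hlo2 : j + 2 - d' ≤ j + 1 := by omega
    have hne2 : wCand lst (j+2-d') (j+1) ≠ [] := wCand_ne_nil _ _ _ hlo2
    obtain ⟨k1, hk1⟩ : ∃ k1, (wCand lst (j+2-d') (j+1)).head? = some k1 := by
      cases h : (wCand lst (j+2-d') (j+1)).head? with
      | none => exact absurd (List.head?_eq_none_iff.mp h) hne2
      | some k => exact ⟨k, rfl⟩
    have hmw := min?_window lst (j+2-d') (j+1) k1 hlo2 hj hk1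
    rw [show j + 1 + 1 - (j + 2 - d') = d' from by omega] at hmw
    have hprev : st.2.2.1 = (aState lst (d' : Int) (j+2-d')).1 := congrArg Prod.fst hout
    have houtl : st.2.2.2 = (aState lst (d' : Int) (j+2-d')).2 := congrArg Prod.snd hout
    have hieq : ((j+1 : Nat) : Int) - (d' : Int) + 1 = ((j+2-d' : Nat) : Int) := by push_cast; omega
    have hAstep : aState lst (d' : Int) (j+1+2-d') =
        (if (aState lst (d' : Int) (j+2-d')).1 ≠ lst.getD k1 0 then
          (lst.getD k1 0, (aState lst (d' : Int) (j+2-d')).2 ++ [[lst.getD k1 0, ((j+2-d' : Nat) : Int)]])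
        else aState lst (d' : Int) (j+2-d')) := by
      have hc : ((j+1+2-d' : Nat) : Int) = ((j+2-d' : Nat) : Int) + 1 := by push_cast; omega
      unfold aState
      rw [hc, PySem.List.pyRange_one_succ_right (by omega)]
      rw [List.foldl_append, List.foldl_cons, List.foldl_nil]
      simp only [aStep]
      rw [PySem.List.slice_natCast_add, hmw]
    by_cases hk0lt : (k0 : Int) < ((j+1 : Nat) : Int) - (d' : Int) + 1
    · simp only [if_pos hk0lt]
      -- the front element leaves the window: k0 = j+1-d' and d' ≤ j+1
      have hd'le : d' ≤ j + 1 := by omega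
      have hk0eq : k0 = j + 1 - d' := by omega
      have hfr := wCand_front lst (j+1-d') (j+1) hlo1
      by_cases hcnd : wCond lst (j+1) (j+1-d') = true
      · rw [if_pos hcnd] at hfr
        rw [show j + 1 - d' + 1 = j + 2 - d' from by omega] at hfr
        have hsplit1 : st.1.take headN ++ (wCand lst (j+1-d') (j+1)).map (fun k => (lst.getD k 0, (k : Int))) =
            (st.1.take headN ++ [(lst.getD (j+1-d') 0, ((j+1-d' : Nat) : Int))]) ++
              (wCand lst (j+2-d') (j+1)).map (fun k => (lst.getD k 0, (k : Int))) := by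
          rw [hfr]
          simp
        have hlen1 : (st.1.take headN ++ [(lst.getD (j+1-d') 0, ((j+1-d' : Nat) : Int))]).length = headN + 1 := by
          simp [hjunk]
        have hget2 : PySem.List.pyGet?
            (st.1.take headN ++ (wCand lst (j+1-d') (j+1)).map (fun k => (lst.getD k 0, (k : Int)))) (st.2.1 + 1) =
            ((wCand lst (j+2-d') (j+1)).map (fun k => (lst.getD k 0, (k : Int)))).head? := by
          rw [hhead, show ((headN : Nat) : Int) + 1 = ((headN + 1 : Nat) : Int) from by push_cast; ring,
              PySem.List.pyGet?_natCast, hsplit1, List.getElem?_append_right (by omega), hlen1,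
              Nat.sub_self, ← List.head?_eq_getElem?]
        have hmap1 : ((wCand lst (j+2-d') (j+1)).map (fun k => (lst.getD k 0, (k : Int)))).head? =
            some (lst.getD k1 0, (k1 : Int)) := by
          rw [List.head?_map, hk1]
          rfl
        rw [hget2, hmap1]
        simp only []
        by_cases hmp : lst.getD k1 0 ≠ st.2.2.1
        · rw [if_pos hmp]
          refine ⟨headN + 1, by rw [hhead]; push_cast; ring, ?_, ?_⟩
          · show (st.1.take headN ++ (wCand lst (j+1-d') (j+1)).map (fun k => (lst.getD k 0, (k : Int)))).drop (headN+1) = _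
            rw [hsplit1, List.drop_left' hlen1, show j + 1 + 1 - d' = j + 2 - d' from by omega]
          · show (lst.getD k1 0, st.2.2.2 ++ [[lst.getD k1 0, ((j+1 : Nat) : Int) - (d' : Int) + 1]]) = _
            rw [hAstep, if_pos (by rw [← hprev]; exact Ne.symm hmp), houtl, hieq]
        · rw [if_neg hmp]
          refine ⟨headN + 1, by rw [hhead]; push_cast; ring, ?_, ?_⟩
          · show (st.1.take headN ++ (wCand lst (j+1-d') (j+1)).map (fun k => (lst.getD k 0, (k : Int)))).drop (headN+1) = _
            rw [hsplit1, List.drop_left' hlen1, show j + 1 + 1 - d' = j + 2 - d' from by omega]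
          · show (st.2.2.1, st.2.2.2) = _
            rw [hAstep, if_neg (by rw [← hprev]; simp only [ne_eq, not_not] at hmp ⊢; exact hmp.symm)]
            exact hout
      · -- impossible: the head k0 would come from wCand (j+2-d'), so k0 ≥ j+2-d'
        exfalso
        rw [if_neg hcnd] at hfr
        rw [hfr] at hk0
        have := (mem_wCand lst _ _ k0 (by omega)).mp (List.mem_of_mem_head? hk0)
        omega
    · simp only [if_neg hk0lt]
      -- the front element stays: the window start did not pass it
      have hcand_eq : wCand lst (j+2-d') (j+1) = wCand lst (j+1-d') (j+1) := by
        by_cases hd2 : d' ≤ j + 1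
        · have hfr := wCand_front lst (j+1-d') (j+1) hlo1
          by_cases hcnd : wCond lst (j+1) (j+1-d') = true
          · exfalso
            rw [if_pos hcnd] at hfr
            rw [hfr] at hk0
            simp only [List.cons_append, List.nil_append, List.head?_cons, Option.some_inj] at hk0
            omega
          · rw [if_neg hcnd] at hfr
            rw [hfr, show j + 1 - d' + 1 = j + 2 - d' from by omega]
            simp
        · rw [show j + 2 - d' = j + 1 - d' from by omega]
      have hk1eq : k1 = k0 := by
        rw [hcand_eq, hk0] at hk1
        exact (Option.some_inj.mp hk1).symm
      subst hk1eq
      rw [hget0, hmap0]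
      simp only []
      by_cases hmp : lst.getD k1 0 ≠ st.2.2.1
      · rw [if_pos hmp]
        refine ⟨headN, hhead, ?_, ?_⟩
        · show (st.1.take headN ++ (wCand lst (j+1-d') (j+1)).map (fun k => (lst.getD k 0, (k : Int)))).drop headN = _
          rw [List.drop_left' hjunk, show j + 1 + 1 - d' = j + 2 - d' from by omega, hcand_eq]
        · show (lst.getD k1 0, st.2.2.2 ++ [[lst.getD k1 0, ((j+1 : Nat) : Int) - (d' : Int) + 1]]) = _
          rw [hAstep, if_pos (by rw [← hprev]; exact Ne.symm hmp), houtl, hieq]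
      · rw [if_neg hmp]
        refine ⟨headN, hhead, ?_, ?_⟩
        · show (st.1.take headN ++ (wCand lst (j+1-d') (j+1)).map (fun k => (lst.getD k 0, (k : Int)))).drop headN = _
          rw [List.drop_left' hjunk, show j + 1 + 1 - d' = j + 2 - d' from by omega, hcand_eq]
        · show (st.2.2.1, st.2.2.2) = _
          rw [hAstep, if_neg (by rw [← hprev]; simp only [ne_eq, not_not] at hmp ⊢; exact hmp.symm)]
          exact hout

  · rw [if_neg (by push_cast; omega)]
    refine ⟨headN, hhead, ?_, ?_⟩
    · show (st.1.take headN ++ (wCand lst (j+1-d') (j+1)).map (fun k => (lst.getD k 0, (k : Int)))).drop headN = _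
      rw [List.drop_left' hjunk, show j + 1 + 1 - d' = j + 1 - d' from by omega]
    · show (st.2.2.1, st.2.2.2) = _
      rw [hout, show j + 1 + 2 - d' = j + 2 - d' from by omega]

theorem bInv_base (lst : List Int) (d' : Nat) (hd : 1 ≤ d') (hn : 0 < lst.length) :
    bInv lst d' 0 (wStep (d' : Int) ([], 0, 100009, []) ((0 : Int), lst.getD 0 0)) := by
  obtain ⟨x, rest, rfl⟩ : ∃ x rest, lst = x :: rest := by
    cases lst with
    | nil => simp at hn
    | cons a b => exact ⟨a, b, rfl⟩
  have hpop : wPop 0 x [] = [] := by rw [wPop]; simp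
  simp only [wStep, List.getD_cons_zero, hpop, List.nil_append]
  have hg : PySem.List.pyGet? [((x:Int), (0:Int))] (0:Int) = some (x, 0) := by
    simp [PySem.List.pyGet?, PySem.List.pyIdx?]
  by_cases hd2 : d' = 1
  · subst hd2
    rw [if_pos (by norm_num)]
    simp only [hg]
    norm_num
    have hstep : aState (x :: rest) ((1:Nat):Int) 1 = (if (100009:Int) ≠ x then (x, [[x, (0:Int)]]) else (100009, [])) := by
      unfold aState
      have hr : PySem.List.pyRange 0 ((1:Nat):Int) 1 = [0] := by
        simpa using PySem.List.pyRange_one_singleton (a := 0)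
      rw [hr]
      simp only [List.foldl_cons, List.foldl_nil]
      unfold aStep
      have hs : PySem.List.slice (x :: rest) (some 0) (some (0 + ((1:Nat):Int))) = [x] := by
        have h0 : (0:Int) = ((0:Nat):Int) := by norm_num
        have h1 : (0:Int) + ((1:Nat):Int) = ((1:Nat):Int) := by norm_num
        rw [h1, h0, PySem.List.slice_natCast]
        simp
      rw [hs]
      have hm : PySem.List.min? [x] (fun z => z) = some x := by
        rw [PySem.List.min?_id_cons]
        simp
      rw [hm]
      simp
    have hcand := wCand_single (x :: rest) 0
    by_cases hx : x = 100009
    · rw [if_pos hx]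
      refine ⟨0, by norm_num, by simp [wCand_single], ?_⟩
      rw [show (0:Nat) + 2 - 1 = 1 by omega, hstep, if_neg (by omega)]
    · rw [if_neg hx]
      refine ⟨0, by norm_num, by simp [wCand_single], ?_⟩
      rw [show (0:Nat) + 2 - 1 = 1 by omega, hstep, if_pos (by omega)]
  · rw [if_neg (by push_cast; omega)]
    refine ⟨0, rfl, ?_, ?_⟩
    · simp only [List.drop_zero]
      have h1 : 0 + 1 - d' = 0 := by omega
      rw [h1, wCand_single]
      simp
    · have h2 : 0 + 2 - d' = 0 := by omega
      rw [h2]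
      unfold aState
      rw [PySem.List.pyRange_one_eq_nil (by norm_num)]
      simp

theorem bFold_inv (lst : List Int) (d' j : Nat) (hd : 1 ≤ d') (hj : j < lst.length) :
    bInv lst d' j ((PySem.List.enumerate (lst.take (j+1)) 0).foldl (wStep (d' : Int)) ([], 0, 100009, [])) := by
  induction j with
  | zero =>
    have h1 : lst.take 1 = [lst.getD 0 0] := by
      have := take_succ_getD lst 0 hj
      simpa using this
    rw [h1]
    simpa [PySem.List.enumerate_nil, PySem.List.enumerate_cons] using bInv_base lst d' hd hj
  | succ k ih =>
    rw [take_succ_getD lst (k+1) hj, enumerate_append_singleton, List.foldl_append]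
    have hlen : ((lst.take (k+1)).length : Int) = ((k+1 : Nat) : Int) := by
      simp [List.length_take]
      omega
    simp only [List.foldl_cons, List.foldl_nil, zero_add, hlen]
    exact bInv_step lst d' k _ hd hj (ih (by omega))

-- main equivalence
theorem winnowing_eq (lst : List Int) (d : Int) (hd : 1 ≤ d) :
    winnowing lst d = winnowing_alt lst d := by
  by_cases hgt : (lst.length : Int) < d
  · simp only [winnowing, winnowing_alt]
    rw [if_pos (Or.inr hgt)]
    rw [PySem.List.pyRange_one_eq_nil (by omega)]
    rfl
  · push_neg at hgt
    have hdi : d = (d.toNat : Int) := by omega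
    have hd1 : 1 ≤ d.toNat := by omega
    have hdn : d.toNat ≤ lst.length := by omega
    have htake : lst.take ((lst.length - 1) + 1) = lst := by
      rw [show lst.length - 1 + 1 = lst.length from by omega, List.take_length]
    have hinv := bFold_inv lst d.toNat (lst.length - 1) hd1 (by omega)
    rw [htake] at hinv
    obtain ⟨headN, hh, hdr, hout⟩ := hinv
    have houtl := congrArg Prod.snd hout
    simp only [] at houtl
    simp only [winnowing, winnowing_alt]
    rw [if_neg (by push_neg; omega)]
    rw [hdi]
    have hc : (lst.length : Int) - (d.toNat : Int) + 1 = ((lst.length - 1 + 2 - d.toNat : Nat) : Int) := by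
      push_cast
      omega
    rw [hc]
    show (aState lst (d.toNat : Int) (lst.length - 1 + 2 - d.toNat)).2 = _
    rw [houtl]

-- ===== VERDICT (by name: the statement is the Claim_ definition above) =====
theorem winnowing_spec : Claim_equal_winnowing := by
  intro lst d _ hpre
  unfold Spec_winnowing
  exact winnowing_eq lst d hpre
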